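-- pv_equiv track=rewrite | github.com/sruthi2498/GoGamePlayer | boardUtil.py | get_edge_counts
-- ===== SOURCE A (Python) =====
-- def get_edge_counts(board,board_encoded,my_piece):
--     opponent_piece_type = 2 if my_piece==1 else 1
--     myTotalCount = 0
--     opponentCount=0
--     n = len(board)
--     i=0
--     for j in range(n):
--         if board[i][j] == my_piece:
--             myTotalCount+=1
--         elif board[i][j] == opponent_piece_type:
--             opponentCount+=1
--     j=0
--     for i in range(1,n):
--         if board[i][j] == my_piece:
--             myTotalCount+=1
--         elif board[i][j] == opponent_piece_type:
--             opponentCount+=1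
--     i=n-1
--     for j in range(1,n):
--         if board[i][j] == my_piece:
--             myTotalCount+=1
--         elif board[i][j] == opponent_piece_type:
--             opponentCount+=1
--     j=n-1
--     for i in range(1,n-1):
--         if board[i][j] == my_piece:
--             myTotalCount+=1
--         elif board[i][j] == opponent_piece_type:
--             opponentCount+=1
--
--     return myTotalCount,opponentCount
-- ===== SOURCE B (Python) =====
-- def get_edge_counts(board, board_encoded, my_piece):
--     opponent_piece_type = 2 if my_piece == 1 else 1
--     n = len(board)
--     myTotalCount = 0
--     opponentCount = 0
--     for i in range(n):
--         for j in range(n):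
--             if i == 0 or i == n - 1 or j == 0 or j == n - 1:
--                 v = board[i][j]
--                 if v == my_piece:
--                     myTotalCount += 1
--                 elif v == opponent_piece_type:
--                     opponentCount += 1
--     return myTotalCount, opponentCount
-- ===== Notes on version B (the rewrite author's own statement) =====
-- stated objective: idiomatic
-- what changed: Replaces A's four hand-offset edge scans with a single nested loop over the whole grid that filters to boundary cells.
import Mathlib
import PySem

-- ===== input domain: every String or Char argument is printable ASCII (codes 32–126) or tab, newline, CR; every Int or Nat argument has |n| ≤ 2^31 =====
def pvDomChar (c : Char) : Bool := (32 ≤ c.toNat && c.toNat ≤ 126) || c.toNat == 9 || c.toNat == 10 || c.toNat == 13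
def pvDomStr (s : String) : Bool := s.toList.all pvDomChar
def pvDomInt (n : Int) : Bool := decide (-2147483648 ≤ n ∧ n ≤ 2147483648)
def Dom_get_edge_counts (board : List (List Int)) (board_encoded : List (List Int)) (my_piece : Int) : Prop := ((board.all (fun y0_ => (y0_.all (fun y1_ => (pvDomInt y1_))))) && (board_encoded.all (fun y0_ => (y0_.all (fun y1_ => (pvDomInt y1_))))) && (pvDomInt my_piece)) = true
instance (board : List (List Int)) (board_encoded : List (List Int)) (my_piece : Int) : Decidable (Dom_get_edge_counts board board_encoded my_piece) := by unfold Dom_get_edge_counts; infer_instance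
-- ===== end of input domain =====

-- B replaces A's four hand-offset edge scans by one nested full-grid loop filtered to the
-- boundary (more idiomatic, not faster); equivalence is about the return value, no mutation.

-- ===== PORT A =====
-- board[i][j] (always in range under Pre_)
def pvCellA (board : List (List Int)) (i j : Int) : Int :=
  PySem.List.pyGetD (PySem.List.pyGetD board i []) j 0

def get_edge_counts (board : List (List Int)) (board_encoded : List (List Int)) (my_piece : Int) : Int × Int :=
  let opponent_piece_type : Int := if my_piece = 1 then 2 else 1
  let n : Int := (board.length : Int)
  -- i = 0; for j in range(n)
  let a0 : Int × Int := (PySem.List.pyRange 0 n 1).foldl (fun acc j =>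
    if pvCellA board 0 j = my_piece then (acc.1 + 1, acc.2)
    else if pvCellA board 0 j = opponent_piece_type then (acc.1, acc.2 + 1) else acc) (0, 0)
  -- j = 0; for i in range(1, n)
  let a1 : Int × Int := (PySem.List.pyRange 1 n 1).foldl (fun acc i =>
    if pvCellA board i 0 = my_piece then (acc.1 + 1, acc.2)
    else if pvCellA board i 0 = opponent_piece_type then (acc.1, acc.2 + 1) else acc) a0
  -- i = n-1; for j in range(1, n)
  let a2 : Int × Int := (PySem.List.pyRange 1 n 1).foldl (fun acc j =>
    if pvCellA board (n - 1) j = my_piece then (acc.1 + 1, acc.2)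
    else if pvCellA board (n - 1) j = opponent_piece_type then (acc.1, acc.2 + 1) else acc) a1
  -- j = n-1; for i in range(1, n-1)
  let a3 : Int × Int := (PySem.List.pyRange 1 (n - 1) 1).foldl (fun acc i =>
    if pvCellA board i (n - 1) = my_piece then (acc.1 + 1, acc.2)
    else if pvCellA board i (n - 1) = opponent_piece_type then (acc.1, acc.2 + 1) else acc) a2
  a3

-- ===== PORT B =====
-- v = board[i][j]
def pvCellB (board : List (List Int)) (i j : Int) : Int :=
  PySem.List.pyGetD (PySem.List.pyGetD board i []) j 0

def get_edge_counts_alt (board : List (List Int)) (board_encoded : List (List Int)) (my_piece : Int) : Int × Int :=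
  let opponent_piece_type : Int := if my_piece = 1 then 2 else 1
  let n : Int := (board.length : Int)
  (PySem.List.pyRange 0 n 1).foldl (fun acc i =>
    (PySem.List.pyRange 0 n 1).foldl (fun acc j =>
      if i = 0 ∨ i = n - 1 ∨ j = 0 ∨ j = n - 1 then
        if pvCellB board i j = my_piece then (acc.1 + 1, acc.2)
        else if pvCellB board i j = opponent_piece_type then (acc.1, acc.2 + 1) else acc
      else acc) acc) (0, 0)

-- ===== PRECONDITION & SPEC =====
-- Pre_ excludes exactly the ragged boards on which Python A raises IndexError
-- (some row shorter than len(board)); on those no value is returned by A.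
def Pre_get_edge_counts (board : List (List Int)) (board_encoded : List (List Int)) (my_piece : Int) : Prop :=
  ∀ row ∈ board, board.length ≤ row.length
instance (board : List (List Int)) (board_encoded : List (List Int)) (my_piece : Int) : Decidable (Pre_get_edge_counts board board_encoded my_piece) := by unfold Pre_get_edge_counts; infer_instance

def pvWitness_get_edge_counts : List (List Int) × List (List Int) × Int := ([[1, 2], [0, 1]], [], 1)

def Spec_get_edge_counts (board : List (List Int)) (board_encoded : List (List Int)) (my_piece : Int) (out : Int × Int) : Prop := out = get_edge_counts_alt board board_encoded my_piece
instance (board : List (List Int)) (board_encoded : List (List Int)) (my_piece : Int) (out : Int × Int) : Decidable (Spec_get_edge_counts board board_encoded my_piece out) := by unfold Spec_get_edge_counts; infer_instance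

-- ===== CLAIM (what is proved, stated in full; the proofs are below) =====
def Claim_equal_get_edge_counts : Prop := ∀ (board : List (List Int)) (board_encoded : List (List Int)) (my_piece : Int), Dom_get_edge_counts board board_encoded my_piece → Pre_get_edge_counts board board_encoded my_piece → Spec_get_edge_counts board board_encoded my_piece (get_edge_counts board board_encoded my_piece)

-- ===== LEMMAS AND PROOFS =====

-- one counting step over an index list, with a guard p: both components are sums
theorem pv_fold_pair {α : Type} (my opp : Int) (v : α → Int) (p : α → Prop) [DecidablePred p] :
    ∀ (l : List α) (acc : Int × Int),
      l.foldl (fun acc j =>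
        if p j then
          if v j = my then (acc.1 + 1, acc.2)
          else if v j = opp then (acc.1, acc.2 + 1) else acc
        else acc) acc
      = (acc.1 + (l.map (fun j => if p j ∧ v j = my then (1 : Int) else 0)).sum,
         acc.2 + (l.map (fun j => if p j ∧ ¬ v j = my ∧ v j = opp then (1 : Int) else 0)).sum) := by
  intro l
  induction l with
  | nil => intro acc; simp
  | cons x t ih =>
      intro acc
      simp only [List.foldl_cons, List.map_cons, List.sum_cons, ih]
      by_cases hp : p x <;> by_cases h1 : v x = my <;> by_cases h2 : v x = opp
      all_goals try have hne : ¬ (opp = my) := fun h => h1 (h ▸ h2)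
      all_goals simp [hp, h1, h2, Prod.ext_iff]
      all_goals try simp [hne]
      all_goals try ring

-- the unguarded version (A's loops)
theorem pv_fold_pair' {α : Type} (my opp : Int) (v : α → Int) (l : List α) (acc : Int × Int) :
    l.foldl (fun acc j =>
        if v j = my then (acc.1 + 1, acc.2)
        else if v j = opp then (acc.1, acc.2 + 1) else acc) acc
    = (acc.1 + (l.map (fun j => if v j = my then (1 : Int) else 0)).sum,
       acc.2 + (l.map (fun j => if ¬ v j = my ∧ v j = opp then (1 : Int) else 0)).sum) := by
  have := pv_fold_pair my opp v (fun _ => True) l acc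
  simpa using this

-- a pair-of-sums loop (B's outer loop after the inner one is summed)
theorem pv_fold_pair_add {α : Type} (F G : α → Int) :
    ∀ (l : List α) (acc : Int × Int),
      l.foldl (fun acc i => (acc.1 + F i, acc.2 + G i)) acc
      = (acc.1 + (l.map F).sum, acc.2 + (l.map G).sum) := by
  intro l
  induction l with
  | nil => intro acc; simp
  | cons x t ih =>
      intro acc
      simp only [List.foldl_cons, List.map_cons, List.sum_cons, ih]
      simp [Prod.ext_iff] ; constructor <;> ring

-- list sums over range = Finset sums
theorem pv_sum_range_list (m : Nat) (F : Nat → Int) :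
    ((List.range m).map F).sum = ∑ k ∈ Finset.range m, F k := by
  induction m with
  | zero => simp
  | succ m ih => rw [List.range_succ, Finset.sum_range_succ]; simp [ih]

-- the boundary double sum equals the four edge sums (all in ℕ-indices)
theorem pv_key (n : Nat) (d : Nat → Nat → Int) :
    ∑ i ∈ Finset.range n, ∑ j ∈ Finset.range n,
        (if i = 0 ∨ i = n - 1 ∨ j = 0 ∨ j = n - 1 then d i j else 0)
    = (((∑ j ∈ Finset.range n, d 0 j)
        + ∑ k ∈ Finset.range (n - 1), d (k + 1) 0)
        + ∑ k ∈ Finset.range (n - 1), d (n - 1) (k + 1))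
        + ∑ k ∈ Finset.range (n - 2), d (k + 1) (n - 1) := by
  match n with
  | 0 => simp
  | 1 => simp
  | (m+2) =>
    show _ = (((∑ j ∈ Finset.range (m+2), d 0 j)
        + ∑ k ∈ Finset.range (m+1), d (k + 1) 0)
        + ∑ k ∈ Finset.range (m+1), d (m+1) (k + 1))
        + ∑ k ∈ Finset.range m, d (k + 1) (m+1)
    have hdec : ∀ i ∈ Finset.range (m+2), ∀ j ∈ Finset.range (m+2),
        (if i = 0 ∨ i = m+2-1 ∨ j = 0 ∨ j = m+2-1 then d i j else 0)
        = (((if i = 0 then d i j else 0)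
          + (if ¬i = 0 ∧ j = 0 then d i j else 0))
          + (if i = m+1 ∧ ¬i = 0 ∧ ¬j = 0 then d i j else 0))
          + (if j = m+1 ∧ ¬i = 0 ∧ ¬i = m+1 ∧ ¬j = 0 then d i j else 0) := by
      intro i _ j _
      have hsub : m+2-1 = m+1 := rfl
      rw [hsub]
      split_ifs <;> omega
    rw [Finset.sum_congr rfl (fun i hi => Finset.sum_congr rfl (fun j hj => hdec i hi j hj))]
    simp only [Finset.sum_add_distrib]
    have e1 : ∑ i ∈ Finset.range (m+2), ∑ j ∈ Finset.range (m+2),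
        (if i = 0 then d i j else 0) = ∑ j ∈ Finset.range (m+2), d 0 j := by
      rw [Finset.sum_eq_single_of_mem 0 (by simp)]
      · simp
      · intro b _ hb; simp [hb]
    have e2 : ∑ i ∈ Finset.range (m+2), ∑ j ∈ Finset.range (m+2),
        (if ¬i = 0 ∧ j = 0 then d i j else 0) = ∑ k ∈ Finset.range (m+1), d (k + 1) 0 := by
      have inner : ∀ i, (∑ j ∈ Finset.range (m+2), (if ¬i = 0 ∧ j = 0 then d i j else 0))
          = if ¬i = 0 then d i 0 else 0 := by
        intro i
        rw [Finset.sum_eq_single_of_mem 0 (by simp)]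
        · by_cases hi : i = 0 <;> simp [hi]
        · intro b _ hb; simp [hb]
      simp only [inner]
      rw [Finset.sum_range_succ']
      simp
    have e3 : ∑ i ∈ Finset.range (m+2), ∑ j ∈ Finset.range (m+2),
        (if i = m+1 ∧ ¬i = 0 ∧ ¬j = 0 then d i j else 0)
        = ∑ k ∈ Finset.range (m+1), d (m+1) (k + 1) := by
      have inner : ∀ i, (∑ j ∈ Finset.range (m+2), (if i = m+1 ∧ ¬i = 0 ∧ ¬j = 0 then d i j else 0))
          = if i = m+1 then (∑ k ∈ Finset.range (m+1), d i (k + 1)) else 0 := by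
        intro i
        by_cases hi : i = m+1
        · subst hi
          rw [if_pos rfl, Finset.sum_range_succ']
          simp
        · simp [hi]
      simp only [inner]
      rw [Finset.sum_eq_single_of_mem (m+1) (by simp)]
      · simp
      · intro b _ hb; simp [hb]
    have e4 : ∑ i ∈ Finset.range (m+2), ∑ j ∈ Finset.range (m+2),
        (if j = m+1 ∧ ¬i = 0 ∧ ¬i = m+1 ∧ ¬j = 0 then d i j else 0)
        = ∑ k ∈ Finset.range m, d (k + 1) (m+1) := by
      have inner : ∀ i, (∑ j ∈ Finset.range (m+2), (if j = m+1 ∧ ¬i = 0 ∧ ¬i = m+1 ∧ ¬j = 0 then d i j else 0))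
          = if ¬i = 0 ∧ ¬i = m+1 then d i (m+1) else 0 := by
        intro i
        rw [Finset.sum_eq_single_of_mem (m+1) (by simp)]
        · by_cases hi : ¬i = 0 ∧ ¬i = m+1
          · rw [if_pos ⟨rfl, hi.1, hi.2, by simp⟩, if_pos hi]
          · rw [if_neg (fun h => hi ⟨h.2.1, h.2.2.1⟩), if_neg hi]
        · intro b _ hb; simp [hb]
      simp only [inner]
      rw [Finset.sum_range_succ, Finset.sum_range_succ']
      have t1 : (if ¬(m+1:Nat) = 0 ∧ ¬(m+1:Nat) = m+1 then d (m+1) (m+1) else 0) = 0 := by simp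
      have t2 : (if ¬(0:Nat) = 0 ∧ ¬(0:Nat) = m+1 then d 0 (m+1) else 0) = 0 := by simp
      rw [t1, t2, add_zero, add_zero]
      refine Finset.sum_congr rfl (fun k hk => ?_)
      have hk' : k < m := Finset.mem_range.mp hk
      rw [if_pos ⟨by omega, by omega⟩]
    rw [e1, e2, e3, e4]

-- board[i][j] on the ℕ side
def pvCellN (board : List (List Int)) (i j : Nat) : Int := (board.getD i []).getD j 0

-- the two per-cell weights (mine / opponent)
def pvW1 (my x : Int) : Int := if x = my then 1 else 0
def pvW2 (my opp x : Int) : Int := if ¬ x = my ∧ x = opp then 1 else 0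

-- A's four edge scans, as Finset sums
def pvEdges (board : List (List Int)) (w : Int → Int) : Int :=
  (((∑ j ∈ Finset.range board.length, w (pvCellN board 0 j))
    + ∑ k ∈ Finset.range (board.length - 1), w (pvCellN board (k + 1) 0))
    + ∑ k ∈ Finset.range (board.length - 1), w (pvCellN board (board.length - 1) (k + 1)))
    + ∑ k ∈ Finset.range (board.length - 2), w (pvCellN board (k + 1) (board.length - 1))

-- B's filtered full-grid scan, as a Finset double sum
def pvGrid (board : List (List Int)) (w : Int → Int) : Int :=
  ∑ i ∈ Finset.range board.length, ∑ j ∈ Finset.range board.length,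
    (if i = 0 ∨ i = board.length - 1 ∨ j = 0 ∨ j = board.length - 1 then w (pvCellN board i j) else 0)

theorem pv_grid_eq_edges (board : List (List Int)) (w : Int → Int) :
    pvGrid board w = pvEdges board w := by
  unfold pvGrid pvEdges
  exact pv_key board.length (fun i j => w (pvCellN board i j))

theorem pv_pyRangeSum (a b : Int) (f : Int → Int) :
    ((PySem.List.pyRange a b 1).map f).sum = ∑ k ∈ Finset.range (b - a).toNat, f (a + ↑k) := by
  rw [PySem.List.pyRange_one, List.map_map, pv_sum_range_list]
  exact Finset.sum_congr rfl (fun k _ => rfl)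

theorem pv_cell_cast (board : List (List Int)) (i j : Nat) :
    pvCellA board (↑i) (↑j) = pvCellN board i j := by
  simp [pvCellA, pvCellN, PySem.List.pyGetD_natCast]

theorem pv_cellB_cast (board : List (List Int)) (i j : Nat) :
    pvCellB board (↑i) (↑j) = pvCellN board i j := by
  simp [pvCellB, pvCellN, PySem.List.pyGetD_natCast]

theorem pv_A_char (board board_encoded : List (List Int)) (my_piece : Int)
    (hn : 1 ≤ board.length) :
    get_edge_counts board board_encoded my_piece
    = (pvEdges board (pvW1 my_piece),
       pvEdges board (pvW2 my_piece (if my_piece = 1 then 2 else 1))) := by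
  simp only [get_edge_counts]
  rw [pv_fold_pair', pv_fold_pair', pv_fold_pair', pv_fold_pair']
  have c0 : ((board.length : Int) - 0).toNat = board.length := by omega
  have c1 : ((board.length : Int) - 1).toNat = board.length - 1 := by omega
  have c2 : ((board.length : Int) - 1 - 1).toNat = board.length - 2 := by omega
  simp only [pv_pyRangeSum, c0, c1, c2, zero_add]
  have hL : ((board.length - 1 : Nat) : Int) = (board.length : Int) - 1 := by omega
  have e0 : ∀ x : Nat, pvCellA board 0 ↑x = pvCellN board 0 x := fun x => by
    simpa using pv_cell_cast board 0 x
  have e1 : ∀ x : Nat, pvCellA board (1 + ↑x) 0 = pvCellN board (x + 1) 0 := fun x => by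
    have h : ((x + 1 : Nat) : Int) = 1 + ↑x := by omega
    have := pv_cell_cast board (x + 1) 0
    rw [h] at this; simpa using this
  have e2 : ∀ x : Nat, pvCellA board ((board.length : Int) - 1) (1 + ↑x)
      = pvCellN board (board.length - 1) (x + 1) := fun x => by
    have h : ((x + 1 : Nat) : Int) = 1 + ↑x := by omega
    have := pv_cell_cast board (board.length - 1) (x + 1)
    rw [h, hL] at this; exact this
  have e3 : ∀ x : Nat, pvCellA board (1 + ↑x) ((board.length : Int) - 1)
      = pvCellN board (x + 1) (board.length - 1) := fun x => by
    have h : ((x + 1 : Nat) : Int) = 1 + ↑x := by omega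
    have := pv_cell_cast board (x + 1) (board.length - 1)
    rw [h, hL] at this; exact this
  simp only [e0, e1, e2, e3]
  simp [pvEdges, pvW1, pvW2]

theorem pv_B_char (board board_encoded : List (List Int)) (my_piece : Int)
    (hn : 1 ≤ board.length) :
    get_edge_counts_alt board board_encoded my_piece
    = (pvGrid board (pvW1 my_piece),
       pvGrid board (pvW2 my_piece (if my_piece = 1 then 2 else 1))) := by
  simp only [get_edge_counts_alt]
  simp only [pv_fold_pair]
  rw [pv_fold_pair_add]
  have c0 : ((board.length : Int) - 0).toNat = board.length := by omega
  simp only [pv_pyRangeSum, c0, zero_add]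
  rw [Prod.mk.injEq]
  constructor <;>
    (simp only [pvGrid, pvW1, pvW2]
     refine Finset.sum_congr rfl fun x hx => ?_
     refine Finset.sum_congr rfl fun y hy => ?_
     simp only [pv_cellB_cast]
     have hic : ((x : Int) = 0 ∨ (x : Int) = (board.length : Int) - 1 ∨ (y : Int) = 0 ∨ (y : Int) = (board.length : Int) - 1)
         ↔ (x = 0 ∨ x = board.length - 1 ∨ y = 0 ∨ y = board.length - 1) := by omega
     simp only [hic]
     by_cases hnc : x = 0 ∨ x = board.length - 1 ∨ y = 0 ∨ y = board.length - 1 <;> simp [hnc])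

theorem pv_main (board board_encoded : List (List Int)) (my_piece : Int) :
    get_edge_counts board board_encoded my_piece = get_edge_counts_alt board board_encoded my_piece := by
  rcases Nat.eq_zero_or_pos board.length with h0 | hpos
  · have hb : board = [] := List.length_eq_zero_iff.mp h0
    subst hb
    rfl
  · rw [pv_A_char board board_encoded my_piece hpos, pv_B_char board board_encoded my_piece hpos,
        pv_grid_eq_edges, pv_grid_eq_edges]

-- ===== VERDICT (by name: the statement is the Claim_ definition above) =====
theorem get_edge_counts_spec : Claim_equal_get_edge_counts := by
  intro board board_encoded my_piece _ _
  unfold Spec_get_edge_counts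
  exact pv_main board board_encoded my_piece
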